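-- pv_equiv track=rewrite | github.com/Aspenini/eol-console-games | extract_games.py | deduplicate_games
-- ===== SOURCE A (Python) =====
-- from typing import List, Dict, Optional, Tuple
--
-- def create_game_key(game: Dict) -> str:
--     """
--     Create a unique key for a game based on title, developer, and publisher.
--     Used for deduplication. Normalizes text for comparison.
--     """
--     title = game.get('title', '').strip().lower()
--     developer = game.get('developer', '').strip().lower()
--     publisher = game.get('publisher', '').strip().lower()
--
--     # Normalize by removing extra whitespace and special characters
--     title = ' '.join(title.split())
--     developer = ' '.join(developer.split())
--     publisher = ' '.join(publisher.split())
--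
--     return f"{title}|||{developer}|||{publisher}"
--
-- def deduplicate_games(games: List[Dict]) -> List[Dict]:
--     """
--     Remove duplicate games from a list. If duplicates found, keep the one with the most complete data.
--     """
--     seen = {}
--     result = []
--
--     for game in games:
--         key = create_game_key(game)
--
--         if key not in seen:
--             seen[key] = game
--             result.append(game)
--         else:
--             # Merge data if duplicate - prefer non-empty values
--             existing = seen[key]
--
--             # Check if current game has more complete data
--             existing_completeness = sum(1 for k in ['title', 'developer', 'publisher', 'release_date']
--                                        if existing.get(k, '').strip())
--             current_completeness = sum(1 for k in ['title', 'developer', 'publisher', 'release_date']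
--                                       if game.get(k, '').strip())
--
--             # Replace if current is more complete, or if it has a release_date and existing doesn't
--             if (current_completeness > existing_completeness) or \
--                (not existing.get('release_date', '').strip() and game.get('release_date', '').strip()):
--                 # Update the existing entry in seen and find it in result to replace
--                 seen[key] = game
--                 for i, r_game in enumerate(result):
--                     if create_game_key(r_game) == key:
--                         result[i] = game
--                         break
--
--     return result
-- ===== SOURCE B (Python) =====
-- from typing import List, Dict
--
-- def create_game_key(game: Dict) -> str:
--     title = ' '.join(game.get('title', '').strip().lower().split())
--     developer = ' '.join(game.get('developer', '').strip().lower().split())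
--     publisher = ' '.join(game.get('publisher', '').strip().lower().split())
--     return f"{title}|||{developer}|||{publisher}"
--
-- def _completeness(game: Dict) -> int:
--     return sum(1 for k in ['title', 'developer', 'publisher', 'release_date']
--                if game.get(k, '').strip())
--
-- def _better(champ: Dict, cand: Dict) -> bool:
--     return (_completeness(cand) > _completeness(champ)) or \
--            (not champ.get('release_date', '').strip() and cand.get('release_date', '').strip())
--
-- def deduplicate_games(games: List[Dict]) -> List[Dict]:
--     # Pass 1: group games by key, preserving first-appearance order of keys.
--     groups = {}
--     for game in games:
--         groups.setdefault(create_game_key(game), []).append(game)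
--     # Pass 2: reduce each group left-to-right to its most complete entry.
--     out = []
--     for members in groups.values():
--         champ = members[0]
--         for cand in members[1:]:
--             if _better(champ, cand):
--                 champ = cand
--         out.append(champ)
--     return out
-- ===== Notes on version B (the rewrite author's own statement) =====
-- stated objective: alternative
-- what changed: Replaces A's single interleaved scan (seen-dict plus an inner linear search through result to splice in a better duplicate) with two separate passes: first group all games by key into ordered lists, then reduce each group left-to-right to its champion and emit the champions.
import Mathlib
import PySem

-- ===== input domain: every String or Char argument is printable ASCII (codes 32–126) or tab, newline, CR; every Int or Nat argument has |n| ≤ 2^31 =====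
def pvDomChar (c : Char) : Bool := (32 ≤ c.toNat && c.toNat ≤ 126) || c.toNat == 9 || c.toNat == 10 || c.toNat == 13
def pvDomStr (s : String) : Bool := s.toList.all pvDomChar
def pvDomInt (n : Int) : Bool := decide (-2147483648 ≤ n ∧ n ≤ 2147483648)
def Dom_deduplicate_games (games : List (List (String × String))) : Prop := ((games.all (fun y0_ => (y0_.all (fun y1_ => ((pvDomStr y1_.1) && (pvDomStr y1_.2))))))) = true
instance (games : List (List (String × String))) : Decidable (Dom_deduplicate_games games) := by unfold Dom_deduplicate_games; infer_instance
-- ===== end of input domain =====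

-- B separates A's single interleaved scan into two passes — group games by key, then reduce
-- each group to its most complete entry — proved to return the same list on every input (objective: alternative).

-- ===== PORT A =====
-- game.get(k, '').strip().lower(); ' '.join(….split())
def pvNorm (s : String) : String :=
  PySem.Str.join " " (PySem.Str.split₀ (PySem.Str.lower (PySem.Str.strip s)))

def create_game_key (game : List (String × String)) : String :=
  PySem.Str.join "|||"
    [pvNorm ((PySem.Dict.mk game).getD "title" ""),
     pvNorm ((PySem.Dict.mk game).getD "developer" ""),
     pvNorm ((PySem.Dict.mk game).getD "publisher" "")]

-- truthiness of game.get(k, '').strip()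
def pvFilled (game : List (String × String)) (k : String) : Bool :=
  PySem.Str.strip ((PySem.Dict.mk game).getD k "") != ""

-- sum(1 for k in ['title','developer','publisher','release_date'] if game.get(k, '').strip())
def pvCompleteness (game : List (String × String)) : Int :=
  (["title", "developer", "publisher", "release_date"].map
    (fun k => if pvFilled game k then (1 : Int) else 0)).sum

-- the 'for i, r_game in enumerate(result): if …: result[i] = game; break' loop
def pvReplaceFirst (res : List (List (String × String))) (key : String)
    (game : List (String × String)) : List (List (String × String)) :=
  match res with
  | [] => []
  | r :: rest =>
      if create_game_key r == key then game :: rest else r :: pvReplaceFirst rest key game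

def pvStepA (st : PySem.Dict String (List (String × String)) × List (List (String × String)))
    (game : List (String × String)) :
    PySem.Dict String (List (String × String)) × List (List (String × String)) :=
  let key := create_game_key game
  if !st.1.contains key then
    (st.1.insert key game, st.2 ++ [game])
  else
    -- seen[key]: the key is present in this branch, so the default is never used
    let existing := st.1.getD key []
    let existing_completeness := pvCompleteness existing
    let current_completeness := pvCompleteness game
    if decide (current_completeness > existing_completeness) ||
        (!pvFilled existing "release_date" && pvFilled game "release_date") then
      (st.1.insert key game, pvReplaceFirst st.2 key game)
    else st

def deduplicate_games (games : List (List (String × String))) : List (List (String × String)) :=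
  (games.foldl pvStepA (PySem.Dict.empty, [])).2

-- ===== PORT B =====
-- groups.setdefault(create_game_key(game), []).append(game)
def pvGroups (games : List (List (String × String))) :
    PySem.Dict String (List (List (String × String))) :=
  games.foldl (fun d g => d.modify (create_game_key g) [] (· ++ [g])) PySem.Dict.empty

def pvBetter (champ cand : List (String × String)) : Bool :=
  decide (pvCompleteness cand > pvCompleteness champ) ||
    (!pvFilled champ "release_date" && pvFilled cand "release_date")

-- champ = members[0]; for cand in members[1:]: if _better(champ, cand): champ = cand
def pvBest (members : List (List (String × String))) : List (String × String) :=
  match members with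
  | [] => []   -- unreachable: every group built by pvGroups is nonempty
  | c :: rest => rest.foldl (fun champ cand => if pvBetter champ cand then cand else champ) c

def deduplicate_games_alt (games : List (List (String × String))) : List (List (String × String)) :=
  (pvGroups games).values.map pvBest

-- ===== PRECONDITION & SPEC =====
def Spec_deduplicate_games (games : List (List (String × String))) (out : List (List (String × String))) : Prop := out = deduplicate_games_alt games
instance (games : List (List (String × String))) (out : List (List (String × String))) : Decidable (Spec_deduplicate_games games out) := by unfold Spec_deduplicate_games; infer_instance

-- ===== CLAIM (what is proved, stated in full; the proofs are below) =====
def Claim_equal_deduplicate_games : Prop := ∀ (games : List (List (String × String))), Dom_deduplicate_games games → Spec_deduplicate_games games (deduplicate_games games)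

-- ===== LEMMAS AND PROOFS =====

lemma pvGroups_getD (p : List (List (String × String))) (k : String) :
    (pvGroups p).getD k [] = p.filter (fun g => create_game_key g == k) := by
  have h : pvGroups p = (p.map (fun g => (create_game_key g, g))).foldl
      (fun d q => d.modify q.1 [] (· ++ [q.2])) PySem.Dict.empty := by
    rw [pvGroups, List.foldl_map]
  rw [h, PySem.Dict.getD_foldl_modify_append]
  simp [List.filter_map, Function.comp_def]

lemma pvGroups_keys (p : List (List (String × String))) :
    (pvGroups p).keys = PySem.Set.ofList (p.map create_game_key) := by
  rw [pvGroups, PySem.Dict.keys_foldl_modify_key]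
  simp [PySem.Dict.keys_empty, PySem.Set.update_nil_left]

lemma pvGroups_nodup (p : List (List (String × String))) :
    (pvGroups p).keys.Nodup := by
  rw [pvGroups_keys]; exact PySem.Set.nodup_ofList _

lemma pvGroups_getD_ne_nil (p : List (List (String × String))) (k : String)
    (hk : k ∈ (pvGroups p).keys) : (pvGroups p).getD k [] ≠ [] := by
  rw [pvGroups_keys] at hk
  rw [pvGroups_getD]
  rcases List.mem_map.1 ((PySem.Set.mem_ofList _ _).1 hk) with ⟨g, hg, hkey⟩
  intro hnil
  have : g ∈ p.filter (fun g => create_game_key g == k) :=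
    List.mem_filter.2 ⟨hg, by simp only [beq_iff_eq]; exact hkey⟩
  simp [hnil] at this

lemma pvBest_mem (l : List (List (String × String))) (h : l ≠ []) : pvBest l ∈ l := by
  cases l with
  | nil => exact absurd rfl h
  | cons c rest =>
    show rest.foldl (fun champ cand => if pvBetter champ cand then cand else champ) c ∈ c :: rest
    clear h
    induction rest generalizing c with
    | nil => simp
    | cons x xs ih =>
      simp only [List.foldl_cons]
      rcases List.mem_cons.1 (ih (if pvBetter c x then x else c)) with h | h
      · rw [h]; by_cases hb : pvBetter c x = true
        · simp [hb]
        · simp [hb]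
      · simp [h]

lemma pvBest_snoc (l : List (List (String × String))) (g : List (String × String)) (h : l ≠ []) :
    pvBest (l ++ [g]) = if pvBetter (pvBest l) g then g else pvBest l := by
  cases l with
  | nil => exact absurd rfl h
  | cons c rest => simp [pvBest, List.foldl_append]

-- value of any entry of pvGroups, via nodup keys
lemma pvGroups_items_val (p : List (List (String × String)))
    (q : String × List (List (String × String))) (hq : q ∈ (pvGroups p).items) :
    q.2 = (pvGroups p).getD q.1 [] :=
  (PySem.Dict.getD_of_mem_items (pvGroups p) hq (pvGroups_nodup p) []).symm

lemma pvGroups_items_ne_nil (p : List (List (String × String)))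
    (q : String × List (List (String × String))) (hq : q ∈ (pvGroups p).items) : q.2 ≠ [] := by
  rw [pvGroups_items_val p q hq]
  exact pvGroups_getD_ne_nil p q.1 (PySem.Dict.mem_keys_of_mem_items (pvGroups p) hq)

lemma pvGroups_items_key (p : List (List (String × String)))
    (q : String × List (List (String × String))) (hq : q ∈ (pvGroups p).items) :
    create_game_key (pvBest q.2) = q.1 := by
  have hne := pvGroups_items_ne_nil p q hq
  have h2 : q.2 = p.filter (fun g => create_game_key g == q.1) := by
    rw [pvGroups_items_val p q hq, pvGroups_getD]
  set e := pvBest q.2 with he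
  have hmem : e ∈ q.2 := pvBest_mem q.2 hne
  rw [h2] at hmem
  have h3 := (List.mem_filter.1 hmem).2
  simp only [beq_iff_eq] at h3
  exact h3

lemma pvReplaceFirst_map (its : List (String × List (List (String × String))))
    (k : String) (g : List (String × String))
    (hnd : (its.map (·.1)).Nodup)
    (hkey : ∀ q ∈ its, create_game_key (pvBest q.2) = q.1) :
    pvReplaceFirst (its.map (fun q => pvBest q.2)) k g
      = its.map (fun q => if q.1 == k then g else pvBest q.2) := by
  induction its with
  | nil => rfl
  | cons q rest ih =>
    have hq := hkey q (by simp)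
    have ihr := ih (List.nodup_cons.1 hnd).2 (fun r hr => hkey r (List.mem_cons_of_mem _ hr))
    rw [List.map_cons, List.map_cons, pvReplaceFirst]
    by_cases hqk : q.1 = k
    · have hb : (create_game_key (pvBest q.2) == k) = true := beq_iff_eq.mpr (hq.trans hqk)
      have hb' : (q.1 == k) = true := beq_iff_eq.mpr hqk
      rw [hb, if_pos rfl, hb', if_pos rfl]
      refine congrArg (g :: ·) ?_
      refine (List.map_congr_left ?_).symm
      intro r hr
      have hrk : (r.1 == k) = false := by
        refine beq_eq_false_iff_ne.mpr ?_
        intro hrk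
        exact (List.nodup_cons.1 hnd).1
          (List.mem_map.2 ⟨r, hr, by show r.1 = q.1; rw [hrk, hqk]⟩)
      rw [hrk, if_neg (by simp)]
    · have hb : (create_game_key (pvBest q.2) == k) = false :=
        beq_eq_false_iff_ne.mpr (by rw [hq]; exact hqk)
      have hb' : (q.1 == k) = false := beq_eq_false_iff_ne.mpr hqk
      rw [hb, if_neg (by simp), hb', if_neg (by simp), ihr]

lemma pvStepA_not_mem (st : PySem.Dict String (List (String × String)) × List (List (String × String)))
    (g : List (String × String)) (h : st.1.contains (create_game_key g) = false) :
    pvStepA st g = (st.1.insert (create_game_key g) g, st.2 ++ [g]) := by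
  simp [pvStepA, h]

lemma pvStepA_mem (st : PySem.Dict String (List (String × String)) × List (List (String × String)))
    (g : List (String × String)) (h : st.1.contains (create_game_key g) = true) :
    pvStepA st g = if pvBetter (st.1.getD (create_game_key g) []) g then
        (st.1.insert (create_game_key g) g, pvReplaceFirst st.2 (create_game_key g) g)
      else st := by
  simp [pvStepA, pvBetter, h]

-- the main invariant: A's seen dict carries the champion of each group, in group order,
-- and A's result list is the list of champions
lemma pv_main (p : List (List (String × String))) :
    (p.foldl pvStepA (PySem.Dict.empty, [])).1.items
        = (pvGroups p).items.map (fun q => (q.1, pvBest q.2))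
    ∧ (p.foldl pvStepA (PySem.Dict.empty, [])).2
        = (pvGroups p).items.map (fun q => pvBest q.2) := by
  induction p using List.reverseRecOn with
  | nil => exact ⟨rfl, rfl⟩
  | append_singleton p g ih =>
    obtain ⟨ih1, ih2⟩ := ih
    have hfold : ((p ++ [g]).foldl pvStepA
          ((PySem.Dict.empty : PySem.Dict String (List (String × String))),
            ([] : List (List (String × String)))))
        = pvStepA (p.foldl pvStepA (PySem.Dict.empty, [])) g := by
      rw [List.foldl_append, List.foldl_cons, List.foldl_nil]
    have hG : pvGroups (p ++ [g]) = (pvGroups p).insert (create_game_key g)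
        ((pvGroups p).getD (create_game_key g) [] ++ [g]) := by
      rw [pvGroups, List.foldl_append, List.foldl_cons, List.foldl_nil, ← pvGroups,
        PySem.Dict.modify]
    have hkeys : (p.foldl pvStepA (PySem.Dict.empty, [])).1.keys = (pvGroups p).keys := by
      simp only [PySem.Dict.keys, ih1, List.map_map]
      rfl
    have hSnd : (p.foldl pvStepA (PySem.Dict.empty, [])).1.keys.Nodup := by
      rw [hkeys]; exact pvGroups_nodup p
    have hcont : (p.foldl pvStepA (PySem.Dict.empty, [])).1.contains (create_game_key g)
        = (pvGroups p).contains (create_game_key g) := by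
      rw [PySem.Dict.contains_eq_decide_mem_keys, PySem.Dict.contains_eq_decide_mem_keys, hkeys]
    by_cases hc : (pvGroups p).contains (create_game_key g) = true
    · -- g's key is already present: A may replace in place, B extends the group
      have hSc : (p.foldl pvStepA (PySem.Dict.empty, [])).1.contains (create_game_key g) = true := by
        rw [hcont]; exact hc
      have hkmem : create_game_key g ∈ (pvGroups p).keys :=
        (PySem.Dict.contains_iff_mem_keys _ _).1 hc
      have hlne : (pvGroups p).getD (create_game_key g) [] ≠ [] :=
        pvGroups_getD_ne_nil p _ hkmem
      have hmem_items : (create_game_key g, (pvGroups p).getD (create_game_key g) [])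
          ∈ (pvGroups p).items := by
        cases hg2 : (pvGroups p).get? (create_game_key g) with
        | none =>
          rw [PySem.Dict.get?_eq_none_iff_not_mem_keys] at hg2
          exact absurd hkmem hg2
        | some v =>
          have hv : (pvGroups p).getD (create_game_key g) [] = v :=
            PySem.Dict.getD_of_get?_eq_some _ [] hg2
          rw [hv]
          exact PySem.Dict.mem_items_of_get?_eq_some _ hg2
      have hexist : (p.foldl pvStepA (PySem.Dict.empty, [])).1.getD (create_game_key g) []
          = pvBest ((pvGroups p).getD (create_game_key g) []) := by
        have hm : (create_game_key g, pvBest ((pvGroups p).getD (create_game_key g) []))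
            ∈ (p.foldl pvStepA (PySem.Dict.empty, [])).1.items := by
          rw [ih1]
          exact List.mem_map.2 ⟨_, hmem_items, rfl⟩
        exact PySem.Dict.getD_of_mem_items _ hm hSnd []
      have hGitems : (pvGroups (p ++ [g])).items
          = (pvGroups p).items.map (fun q => if q.1 == create_game_key g then
              (create_game_key g, (pvGroups p).getD (create_game_key g) [] ++ [g]) else q) := by
        rw [hG, PySem.Dict.items_insert, hc, if_pos rfl]
      have hval : ∀ q ∈ (pvGroups p).items, (q.1 == create_game_key g) = true →
          q.2 = (pvGroups p).getD (create_game_key g) [] := by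
        intro q hq hqk
        rw [pvGroups_items_val p q hq, beq_iff_eq.1 hqk]
      have hfsts : ((pvGroups p).items.map (·.1)).Nodup := by
        have := pvGroups_nodup p
        simpa only [PySem.Dict.keys] using this
      rw [hfold, pvStepA_mem _ _ hSc, hexist]
      by_cases hb : pvBetter (pvBest ((pvGroups p).getD (create_game_key g) [])) g = true
      · rw [if_pos hb]
        refine ⟨?_, ?_⟩
        · rw [PySem.Dict.items_insert, hSc, if_pos rfl, ih1, hGitems, List.map_map,
            List.map_map]
          refine List.map_congr_left ?_
          intro q hq
          by_cases hqk : q.1 = create_game_key g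
          · simp [hqk, pvBest_snoc _ _ hlne, hb]
          · simp [hqk]
        · rw [ih2, hGitems, List.map_map,
            pvReplaceFirst_map _ _ _ hfsts (pvGroups_items_key p)]
          refine List.map_congr_left ?_
          intro q hq
          by_cases hqk : q.1 = create_game_key g
          · simp [hqk, pvBest_snoc _ _ hlne, hb]
          · simp [hqk]
      · rw [if_neg hb]
        refine ⟨?_, ?_⟩
        · rw [ih1, hGitems, List.map_map]
          refine List.map_congr_left ?_
          intro q hq
          by_cases hqk : q.1 = create_game_key g
          · have hq2 : q.2 = (pvGroups p).getD (create_game_key g) [] :=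
              hval q hq (beq_iff_eq.2 hqk)
            simp [hqk, hq2, pvBest_snoc _ _ hlne, hb]
          · simp [hqk]
        · rw [ih2, hGitems, List.map_map]
          refine List.map_congr_left ?_
          intro q hq
          by_cases hqk : q.1 = create_game_key g
          · have hq2 : q.2 = (pvGroups p).getD (create_game_key g) [] :=
              hval q hq (beq_iff_eq.2 hqk)
            simp [hqk, hq2, pvBest_snoc _ _ hlne, hb]
          · simp [hqk]
    · -- fresh key: both sides append
      have hc' : (pvGroups p).contains (create_game_key g) = false := by simpa using hc
      have hSc : (p.foldl pvStepA (PySem.Dict.empty, [])).1.contains (create_game_key g)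
          = false := by rw [hcont]; exact hc'
      have hl0 : (pvGroups p).getD (create_game_key g) [] = [] :=
        PySem.Dict.getD_of_not_contains _ [] hc'
      rw [hfold, pvStepA_not_mem _ _ hSc]
      refine ⟨?_, ?_⟩
      · rw [PySem.Dict.items_insert, hSc, if_neg (by simp), ih1, hG, hl0,
          PySem.Dict.items_insert, hc', if_neg (by simp)]
        simp [pvBest]
      · rw [ih2, hG, hl0, PySem.Dict.items_insert, hc', if_neg (by simp)]
        simp [pvBest]

-- ===== VERDICT (by name: the statement is the Claim_ definition above) =====
theorem deduplicate_games_spec : Claim_equal_deduplicate_games := by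
  intro games _
  unfold Spec_deduplicate_games deduplicate_games deduplicate_games_alt
  rw [(pv_main games).2]
  simp [PySem.Dict.values, List.map_map, Function.comp_def]
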